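-- pv_equiv track=rewrite | github.com/cutehammond772/problem-solving-archive | 백준/Gold/27892. 특별한 큰 분수/특별한 큰 분수.py | solve
-- ===== SOURCE A (Python) =====
-- def solve(X, N):
-- 	memo, visit = [X], {X}
--
-- 	for t in range(N):
-- 		if memo[-1] % 2:
-- 			memo.append((memo[-1] << 1) ^ 6)
-- 		else:
-- 			memo.append((memo[-1] >> 1) ^ 6)
--
-- 		if memo[-1] in visit:
-- 			start = memo.index(memo[-1], 0, len(memo) - 1)
-- 			sequence = (len(memo) - 1) - start
--
-- 			return memo[start + (N - start) % sequence]
--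
-- 		visit.add(memo[-1])
--
-- 	return memo[-1]
-- ===== SOURCE B (Python) =====
-- def solve(X, N):
--     # Floyd tortoise-and-hare cycle detection (constant memory), capped at N steps.
--     if N <= 0:
--         return X
--
--     def nxt(x):
--         return ((x << 1) ^ 6) if x % 2 else ((x >> 1) ^ 6)
--
--     tort = nxt(X)
--     hare = nxt(tort)
--     i = 1
--     while tort != hare:
--         if i == N:
--             return tort  # no cycle within N steps: tort is the N-th iterate
--         tort = nxt(tort)
--         hare = nxt(nxt(hare))
--         i += 1
--
--     # cycle found: tort == iterate(i) == iterate(2*i) with 1 <= i <= N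
--     mu = 0
--     p, q = X, tort
--     while p != q:
--         p = nxt(p)
--         q = nxt(q)
--         mu += 1
--
--     lam = 1
--     q = nxt(p)
--     while q != p:
--         q = nxt(q)
--         lam += 1
--
--     r = p
--     for _ in range((N - mu) % lam):
--         r = nxt(r)
--     return r
-- ===== Notes on version B (the rewrite author's own statement) =====
-- stated objective: alternative
-- what changed: Replaces A's growing memo list + visited set (with a list.index scan on repeat) by Floyd's constant-memory tortoise-and-hare cycle detection capped at N steps, recovering the cycle start mu and length lam with two pointer walks and returning the mu+(N-mu)%lam-th iterate.
import Mathlib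
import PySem

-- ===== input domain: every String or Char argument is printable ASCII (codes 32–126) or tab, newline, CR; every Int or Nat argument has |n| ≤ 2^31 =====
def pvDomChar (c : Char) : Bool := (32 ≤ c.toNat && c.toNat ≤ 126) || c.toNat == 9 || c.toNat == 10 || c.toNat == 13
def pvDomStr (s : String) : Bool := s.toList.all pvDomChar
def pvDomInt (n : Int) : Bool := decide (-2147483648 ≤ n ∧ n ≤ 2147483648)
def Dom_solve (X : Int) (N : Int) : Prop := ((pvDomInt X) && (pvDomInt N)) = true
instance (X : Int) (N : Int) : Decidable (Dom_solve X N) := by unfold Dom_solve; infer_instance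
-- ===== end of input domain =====

-- B replaces A's memo-list + visited-set cycle detection by Floyd's constant-memory
-- tortoise-and-hare (capped at N steps); objective: alternative algorithm, constant memory.

-- ===== PORT A =====
-- the loop 'for t in range(N)' with early return, as fuel recursion (fuel = number of
-- remaining iterations = len(range(N)) minus those already done); memo/visit are the loop state.
-- memo[-1] is pyGetD with default 0: memo is never empty so the default is never used.
-- x << 1 / x >> 1 are Lean's <<< / >>> on Int (Python-exact), ^ is PySem.Int.bxor.
def solveGo (N : Int) : Nat → List Int → PySem.Set Int → Int
  | 0, memo, _ => PySem.List.pyGetD memo (-1) 0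
  | Nat.succ fuel, memo, visit =>
      let last := PySem.List.pyGetD memo (-1) 0
      -- 'if memo[-1] % 2:' — append (last << 1) ^ 6 or (last >> 1) ^ 6
      let v := if PySem.Int.mod last 2 ≠ 0 then PySem.Int.bxor (last <<< (1:Nat)) 6
               else PySem.Int.bxor (last >>> (1:Nat)) 6
      let memo' := memo ++ [v]
      if PySem.Set.contains visit v then
        -- memo.index(memo[-1], 0, len(memo) - 1): first index of v in memo'[0 : len-1]
        match PySem.List.index? (memo'.take (memo'.length - 1)) v with
        | some start =>
            let sequence : Int := (PySem.List.len memo' - 1) - (start : Int)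
            PySem.List.pyGetD memo' ((start : Int) + PySem.Int.mod (N - (start : Int)) sequence) 0
        | none => 0  -- unreachable: v ∈ visit ⊆ memo'[0 : len-1], so index never raises
      else solveGo N fuel memo' (PySem.Set.add visit v)

def solve (X : Int) (N : Int) : Int :=
  solveGo N N.toNat [X] (PySem.Set.ofList [X])

-- ===== PORT B =====
-- helper nxt(x) of Source B
def nxtB (x : Int) : Int :=
  if PySem.Int.mod x 2 ≠ 0 then PySem.Int.bxor (x <<< (1:Nat)) 6
  else PySem.Int.bxor (x >>> (1:Nat)) 6

-- 'while p != q: p, q = nxt(p), nxt(q); mu += 1' — fuel-bounded (fuel never runs out, proved below)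
def muLoopB : Nat → Int → Int → Int → Int × Int
  | 0, p, _, mu => (p, mu)
  | Nat.succ f, p, q, mu => if p = q then (p, mu) else muLoopB f (nxtB p) (nxtB q) (mu + 1)

-- 'lam = 1; q = nxt(p); while q != p: q = nxt(q); lam += 1' — fuel-bounded likewise
def lamLoopB : Nat → Int → Int → Int → Int
  | 0, _, _, lam => lam
  | Nat.succ f, q, p, lam => if q = p then lam else lamLoopB f (nxtB q) p (lam + 1)

-- 'r = p; for _ in range(k): r = nxt(r)'
def iterB : Nat → Int → Int
  | 0, x => x
  | Nat.succ k, x => iterB k (nxtB x)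

-- the recovery phase after tortoise and hare met at value 'tort'
def recoverB (X N tort : Int) : Int :=
  let pm := muLoopB N.toNat X tort 0
  let lam := lamLoopB N.toNat (nxtB pm.1) pm.1 1
  iterB (PySem.Int.mod (N - pm.2) lam).toNat pm.1

-- 'while tort != hare: if i == N: return tort; tort = nxt(tort); hare = nxt(nxt(hare)); i += 1'
-- (fuel = N - i, the number of advances still allowed)
def floydGo (X N : Int) : Nat → Int → Int → Int
  | 0, tort, hare => if tort = hare then recoverB X N tort else tort
  | Nat.succ f, tort, hare =>
      if tort = hare then recoverB X N tort
      else floydGo X N f (nxtB tort) (nxtB (nxtB hare))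

def solve_alt (X : Int) (N : Int) : Int :=
  if N ≤ 0 then X
  else floydGo X N (N.toNat - 1) (nxtB X) (nxtB (nxtB X))

-- ===== PRECONDITION & SPEC =====
def Spec_solve (X : Int) (N : Int) (out : Int) : Prop := out = solve_alt X N
instance (X : Int) (N : Int) (out : Int) : Decidable (Spec_solve X N out) := by unfold Spec_solve; infer_instance

-- ===== CLAIM (what is proved, stated in full; the proofs are below) =====
def Claim_equal_solve : Prop := ∀ (X : Int) (N : Int), Dom_solve X N → Spec_solve X N (solve X N)

-- ===== LEMMAS AND PROOFS =====

-- iterB composes; head form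
theorem iterB_add (a b : Nat) (x : Int) : iterB (a + b) x = iterB b (iterB a x) := by
  induction a generalizing x with
  | zero => simp [iterB]
  | succ k ih =>
      have : k + 1 + b = (k + b) + 1 := by omega
      rw [this]
      show iterB (k + b) (nxtB x) = iterB b (iterB (k+1) x)
      rw [ih (nxtB x)]; rfl

theorem iterB_succ' (k : Nat) (x : Int) : iterB (k + 1) x = nxtB (iterB k x) := by
  rw [iterB_add k 1 x]; rfl

-- periodicity: one period step, many, and reduction modulo the period
theorem periodic_step (X : Int) (a d : Nat)
    (h : iterB a X = iterB (a + d) X) :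
    ∀ m, iterB (a + m + d) X = iterB (a + m) X := by
  intro m
  induction m with
  | zero => simpa using h.symm
  | succ k ih =>
      have e1 : a + (k+1) + d = (a + k + d) + 1 := by omega
      have e2 : a + (k+1) = (a + k) + 1 := by omega
      rw [e1, e2, iterB_succ', iterB_succ', ih]

theorem periodic_mul (X : Int) (a d : Nat)
    (h : iterB a X = iterB (a + d) X) :
    ∀ q m, iterB (a + m + q * d) X = iterB (a + m) X := by
  intro q
  induction q with
  | zero => simp
  | succ k ih =>
      intro m
      have e : a + m + (k+1) * d = a + (m + k * d) + d := by ring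
      rw [e, periodic_step X a d h (m + k * d)]
      have e2 : a + (m + k * d) = a + m + k * d := by omega
      rw [e2, ih m]

theorem reduce_mod (X : Int) (a d n : Nat)
    (h : iterB a X = iterB (a + d) X) (hn : a ≤ n) :
    iterB (a + (n - a) % d) X = iterB n X := by
  have hsplit : n = a + (n - a) % d + ((n - a) / d) * d := by
    have h1 := Nat.div_add_mod (n - a) d
    have h2 : ((n - a) / d) * d = d * ((n - a) / d) := Nat.mul_comm _ _
    omega
  conv_rhs => rw [hsplit]
  rw [periodic_mul X a d h ((n - a) / d) ((n - a) % d)]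

-- the list of the first m iterates (A's memo after m-1 completed iterations)
def iterList (X : Int) (m : Nat) : List Int :=
  (List.range m).map (fun k => iterB k X)

theorem iterList_succ (X : Int) (m : Nat) :
    iterList X (m + 1) = iterList X m ++ [iterB m X] := by
  simp [iterList, List.range_succ]

-- casting: s + (N - s) % (t+1-s) as computed by A equals the Nat expression
theorem idx_cast (n s d : Nat) (hs : s ≤ n) (hd : 0 < d) :
    (s : Int) + PySem.Int.mod ((n : Int) - (s : Int)) (d : Int) =
      ((s + (n - s) % d : Nat) : Int) := by
  rw [PySem.Int.mod_eq_emod_of_pos (by exact_mod_cast hd)]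
  have e1 : (n : Int) - (s : Int) = ((n - s : Nat) : Int) := by omega
  rw [e1]
  rw [← Int.natCast_mod]
  omega

-- one unfolding of A's loop body (the step expression is definitionally nxtB)
theorem solveGo_succ (N : Int) (f : Nat) (memo : List Int) (visit : PySem.Set Int)
    (v : Int) (memo' : List Int)
    (hv : v = nxtB (PySem.List.pyGetD memo (-1) 0)) (hm : memo' = memo ++ [v]) :
    solveGo N (f + 1) memo visit =
      if PySem.Set.contains visit v then
        match PySem.List.index? (memo'.take (memo'.length - 1)) v with
        | some start =>
            PySem.List.pyGetD memo'
              ((start : Int) + PySem.Int.mod (N - (start : Int))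
                ((PySem.List.len memo' - 1) - (start : Int))) 0
        | none => 0
      else solveGo N f memo' (PySem.Set.add visit v) := by
  subst hv hm; rfl

-- A's loop invariant: with memo = the first t+1 iterates and visit containing exactly them,
-- and fuel the remaining iterations, solveGo returns the N.toNat-th iterate.
theorem solveGo_eq (X N : Int) :
    ∀ (fuel t : Nat) (visit : PySem.Set Int),
      N.toNat = t + fuel →
      (∀ y, PySem.Set.contains visit y = true ↔ y ∈ iterList X (t + 1)) →
      solveGo N fuel (iterList X (t + 1)) visit = iterB N.toNat X := by
  intro fuel
  induction fuel with
  | zero =>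
      intro t visit h1 h2
      show PySem.List.pyGetD (iterList X (t + 1)) (-1) 0 = iterB N.toNat X
      rw [iterList_succ, PySem.List.pyGetD_neg_one_append_singleton,
          show N.toNat = t by omega]
  | succ f ih =>
      intro t visit h1 h2
      have hNpos : N = (N.toNat : Int) := by
        have : 0 < N.toNat := by omega
        omega
      set n := N.toNat with hn
      have hlast : PySem.List.pyGetD (iterList X (t + 1)) (-1) 0 = iterB t X := by
        rw [iterList_succ, PySem.List.pyGetD_neg_one_append_singleton]
      rw [solveGo_succ N f (iterList X (t + 1)) visit (iterB (t + 1) X) (iterList X (t + 2))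
            (by rw [hlast, iterB_succ']) (iterList_succ X (t + 1))]
      have hlen : (iterList X (t + 2)).length = t + 2 := by simp [iterList]
      by_cases hc : PySem.Set.contains visit (iterB (t + 1) X) = true
      · rw [if_pos hc]
        have hmem : iterB (t + 1) X ∈ iterList X (t + 1) := (h2 _).mp hc
        have htake : (iterList X (t + 2)).take ((iterList X (t + 2)).length - 1)
            = iterList X (t + 1) := by
          rw [hlen, iterList_succ X (t + 1)]
          simp [iterList]
        rw [htake]
        cases hidx : PySem.List.index? (iterList X (t + 1)) (iterB (t + 1) X) with
        | none =>
            exact absurd hmem ((PySem.List.index?_eq_none_iff _ _).mp hidx)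
        | some s =>
            obtain ⟨hs, hkey, -⟩ := PySem.List.getElem_of_index?_eq_some hidx
            rw [iterList] at hs
            simp only [List.length_map, List.length_range] at hs
            have hkey' : iterB s X = iterB (t + 1) X := by
              have := hkey
              simp only [iterList, List.getElem_map, List.getElem_range] at this
              exact this
            set d := t + 1 - s with hd
            have hdpos : 0 < d := by omega
            have hdiv : PySem.List.len (iterList X (t + 2)) - 1 - (s : Int) = (d : Int) := by
              rw [PySem.List.len_eq, hlen]; push_cast; omega
            show PySem.List.pyGetD (iterList X (t + 2))
                ((s : Int) + PySem.Int.mod (N - (s : Int))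
                  (PySem.List.len (iterList X (t + 2)) - 1 - (s : Int))) 0 = iterB n X
            rw [hdiv, hNpos, idx_cast n s d (by omega) hdpos,
                PySem.List.pyGetD_natCast]
            have hidxlt : s + (n - s) % d < t + 2 := by
              have := Nat.mod_lt (n - s) hdpos
              omega
            rw [iterList, PySem.List.getD_map_range _ _ _ _ hidxlt]
            have hper : iterB s X = iterB (s + d) X := by
              rw [show s + d = t + 1 by omega]; exact hkey'
            exact reduce_mod X s d n hper (by omega)
      · rw [if_neg hc]
        apply ih (t + 1)
        · omega
        · intro y
          rw [PySem.Set.contains_iff, PySem.Set.mem_add, iterList_succ X (t + 1)]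
          constructor
          · rintro (hy | rfl)
            · exact List.mem_append_left _ ((h2 y).mp ((PySem.Set.contains_iff visit y).mpr hy))
            · exact List.mem_append_right _ (List.mem_singleton.mpr rfl)
          · intro hy
            rcases List.mem_append.mp hy with hy | hy
            · exact Or.inl ((PySem.Set.contains_iff visit y).mp ((h2 y).mpr hy))
            · exact Or.inr (List.mem_singleton.mp hy)

-- B: searching loops
theorem muLoopB_spec (X : Int) (i : Nat) :
    ∀ (fuel m j : Nat), j ≤ fuel →
      iterB (m + j) X = iterB ((m + j) + i) X →
      ∃ μ : Nat, m ≤ μ ∧ μ ≤ m + j ∧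
        muLoopB fuel (iterB m X) (iterB (m + i) X) (m : Int) = (iterB μ X, (μ : Int)) ∧
        iterB μ X = iterB (μ + i) X := by
  intro fuel
  induction fuel with
  | zero =>
      intro m j hj hP
      have hj0 : j = 0 := by omega
      subst hj0
      exact ⟨m, le_refl m, by omega, rfl, by simpa using hP⟩
  | succ f ih =>
      intro m j hj hP
      by_cases hpq : iterB m X = iterB (m + i) X
      · exact ⟨m, le_refl m, by omega, by simp [muLoopB, hpq], hpq⟩
      · have hj1 : 1 ≤ j := by
          by_contra hc
          have : j = 0 := by omega
          subst this
          exact hpq (by simpa using hP)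
        have hP' : iterB ((m + 1) + (j - 1)) X = iterB (((m + 1) + (j - 1)) + i) X := by
          have e : (m + 1) + (j - 1) = m + j := by omega
          rw [e]; exact hP
        obtain ⟨μ, h1, h2, h3, h4⟩ := ih (m + 1) (j - 1) (by omega) hP'
        refine ⟨μ, by omega, by omega, ?_, h4⟩
        rw [show muLoopB (f + 1) (iterB m X) (iterB (m + i) X) (m : Int)
              = muLoopB f (nxtB (iterB m X)) (nxtB (iterB (m + i) X)) ((m : Int) + 1) by
            simp [muLoopB, hpq]]
        have e1 : nxtB (iterB m X) = iterB (m + 1) X := (iterB_succ' m X).symm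
        have e2 : nxtB (iterB (m + i) X) = iterB ((m + 1) + i) X := by
          rw [← iterB_succ']; congr 1; omega
        have e3 : ((m : Int) + 1) = (((m + 1 : Nat)) : Int) := by push_cast; ring
        rw [e1, e2, e3, h3]

theorem lamLoopB_spec (X : Int) (μ : Nat) :
    ∀ (fuel l j : Nat), 1 ≤ l → j ≤ fuel →
      iterB (μ + (l + j)) X = iterB μ X →
      ∃ lam : Nat, l ≤ lam ∧ 1 ≤ lam ∧
        lamLoopB fuel (iterB (μ + l) X) (iterB μ X) (l : Int) = (lam : Int) ∧
        iterB (μ + lam) X = iterB μ X := by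
  intro fuel
  induction fuel with
  | zero =>
      intro l j hl hj hP
      have hj0 : j = 0 := by omega
      subst hj0
      exact ⟨l, le_refl l, hl, rfl, by simpa using hP⟩
  | succ f ih =>
      intro l j hl hj hP
      by_cases hpq : iterB (μ + l) X = iterB μ X
      · exact ⟨l, le_refl l, hl, by simp [lamLoopB, hpq], hpq⟩
      · have hj1 : 1 ≤ j := by
          by_contra hc
          have : j = 0 := by omega
          subst this
          exact hpq (by simpa using hP)
        have hP' : iterB (μ + ((l + 1) + (j - 1))) X = iterB μ X := by
          have e : (l + 1) + (j - 1) = l + j := by omega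
          rw [e]; exact hP
        obtain ⟨lam, h1, h2, h3, h4⟩ := ih (l + 1) (j - 1) (by omega) (by omega) hP'
        refine ⟨lam, by omega, h2, ?_, h4⟩
        rw [show lamLoopB (f + 1) (iterB (μ + l) X) (iterB μ X) (l : Int)
              = lamLoopB f (nxtB (iterB (μ + l) X)) (iterB μ X) ((l : Int) + 1) by
            simp [lamLoopB, hpq]]
        have e1 : nxtB (iterB (μ + l) X) = iterB (μ + (l + 1)) X := by
          rw [show μ + (l + 1) = (μ + l) + 1 by omega, iterB_succ']
        have e3 : ((l : Int) + 1) = (((l + 1 : Nat)) : Int) := by push_cast; ring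
        rw [e1, e3, h3]

theorem recoverB_eq (X N : Int) (i : Nat) (hi : 1 ≤ i) (hin : i ≤ N.toNat) (hN : 0 < N)
    (h : iterB i X = iterB (2 * i) X) :
    recoverB X N (iterB i X) = iterB N.toNat X := by
  set n := N.toNat with hn
  have hNn : N = (n : Int) := by omega
  have hP : iterB (0 + i) X = iterB ((0 + i) + i) X := by
    simpa [two_mul] using h
  obtain ⟨μ, hm0, hmi, hmu, hPμ⟩ := muLoopB_spec X i n 0 i hin hP
  have hmu' : muLoopB n X (iterB i X) 0 = (iterB μ X, (μ : Int)) := by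
    simpa [iterB] using hmu
  have hQ : iterB (μ + (1 + (i - 1))) X = iterB μ X := by
    rw [show 1 + (i - 1) = i by omega]; exact hPμ.symm
  obtain ⟨lam, hl1, hl2, hlam, hQl⟩ := lamLoopB_spec X μ n 1 (i - 1) le_rfl (by omega) hQ
  have hlam' : lamLoopB n (nxtB (iterB μ X)) (iterB μ X) 1 = (lam : Int) := by
    have e1 : iterB (μ + 1) X = nxtB (iterB μ X) := by rw [iterB_succ']
    rw [← e1]
    simpa using hlam
  have hmod : (PySem.Int.mod (N - (μ : Int)) (lam : Int)).toNat = (n - μ) % lam := by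
    rw [PySem.Int.mod_eq_emod_of_pos (by exact_mod_cast hl2), hNn]
    have e1 : (n : Int) - (μ : Int) = ((n - μ : Nat) : Int) := by omega
    rw [e1, ← Int.natCast_mod]
    omega
  show (let pm := muLoopB n X (iterB i X) 0
        let lam' := lamLoopB n (nxtB pm.1) pm.1 1
        iterB (PySem.Int.mod (N - pm.2) lam').toNat pm.1) = iterB n X
  rw [hmu']
  show iterB (PySem.Int.mod (N - (μ : Int)) (lamLoopB n (nxtB (iterB μ X)) (iterB μ X) 1)).toNat (iterB μ X) = iterB n X
  rw [hlam', hmod, ← iterB_add]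
  exact reduce_mod X μ lam n hQl.symm (by omega)

theorem floydGo_eq (X N : Int) (hN : 0 < N) :
    ∀ (fuel i : Nat), 1 ≤ i → i + fuel = N.toNat →
      floydGo X N fuel (iterB i X) (iterB (2 * i) X) = iterB N.toNat X := by
  intro fuel
  induction fuel with
  | zero =>
      intro i hi hsum
      show (if iterB i X = iterB (2 * i) X then recoverB X N (iterB i X) else iterB i X) = _
      split_ifs with heq
      · exact recoverB_eq X N i hi (by omega) hN heq
      · rw [show i = N.toNat by omega]
  | succ f ih =>
      intro i hi hsum
      show (if iterB i X = iterB (2 * i) X then recoverB X N (iterB i X)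
            else floydGo X N f (nxtB (iterB i X)) (nxtB (nxtB (iterB (2 * i) X)))) = _
      split_ifs with heq
      · exact recoverB_eq X N i hi (by omega) hN heq
      · have e1 : nxtB (iterB i X) = iterB (i + 1) X := (iterB_succ' i X).symm
        have e2 : nxtB (nxtB (iterB (2 * i) X)) = iterB (2 * (i + 1)) X := by
          rw [show 2 * (i + 1) = (2 * i + 1) + 1 by ring, iterB_succ', iterB_succ']
        rw [e1, e2]
        exact ih (i + 1) (by omega) (by omega)

theorem solve_eq_iter (X N : Int) : solve X N = iterB N.toNat X := by
  unfold solve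
  have h1 : ([X] : List Int) = iterList X (0 + 1) := by simp [iterList, iterB]
  rw [h1]
  apply solveGo_eq X N N.toNat 0
  · omega
  · intro y
    rw [PySem.Set.contains_iff, PySem.Set.mem_ofList, ← h1]

theorem solve_alt_eq_iter (X N : Int) : solve_alt X N = iterB N.toNat X := by
  unfold solve_alt
  split_ifs with hle
  · rw [show N.toNat = 0 by omega]; rfl
  · have hN : 0 < N := by omega
    rw [show nxtB (nxtB X) = iterB (2 * 1) X from rfl,
        show nxtB X = iterB 1 X from rfl]
    exact floydGo_eq X N hN (N.toNat - 1) 1 le_rfl (by omega)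

-- ===== VERDICT (by name: the statement is the Claim_ definition above) =====
theorem solve_spec : Claim_equal_solve := by
  intro X N _
  show solve X N = solve_alt X N
  rw [solve_eq_iter, solve_alt_eq_iter]
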